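-- pv_equiv track=rewrite | github.com/Senri12/transkriber | backend/main.py | _merge_transcript
-- ===== SOURCE A (Python) =====
-- def _normalize_text(text: str) -> str:
--     return " ".join(text.split()).strip()
--
-- def _merge_transcript(existing: str, candidate: str) -> tuple[str, str]:
--     existing_clean = _normalize_text(existing)
--     candidate_clean = _normalize_text(candidate)
--
--     if not candidate_clean:
--         return existing_clean, ""
--     if not existing_clean:
--         return candidate_clean, candidate_clean
--
--     lower_existing = existing_clean.lower()
--     lower_candidate = candidate_clean.lower()
--     max_overlap = min(len(lower_existing), len(lower_candidate), 280)
--     best_overlap = 0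
--
--     for size in range(max_overlap, 0, -1):
--         if lower_existing.endswith(lower_candidate[:size]):
--             best_overlap = size
--             break
--
--     delta = candidate_clean[best_overlap:].lstrip(" ,.;:!?-")
--     if not delta:
--         return existing_clean, ""
--
--     return f"{existing_clean} {delta}".strip(), delta
-- ===== SOURCE B (Python) =====
-- def _normalize_text(text: str) -> str:
--     return " ".join(text.split()).strip()
--
-- def _merge_transcript(existing: str, candidate: str) -> tuple[str, str]:
--     existing_clean = _normalize_text(existing)
--     candidate_clean = _normalize_text(candidate)
--
--     if not candidate_clean:
--         return existing_clean, ""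
--     if not existing_clean:
--         return candidate_clean, candidate_clean
--
--     lower_existing = existing_clean.lower()
--     lower_candidate = candidate_clean.lower()
--     max_overlap = min(len(lower_existing), len(lower_candidate), 280)
--     pattern = lower_candidate[:max_overlap]
--
--     # One forward pass over the tail of the existing text, tracking ALL active
--     # match lengths (lengths k such that pattern[:k] is a suffix of the text
--     # consumed so far), kept in decreasing order; the head of the final list is
--     # the longest prefix of the candidate that is a suffix of the existing text.
--     lens: list[int] = []
--     for c in lower_existing[-max_overlap:]:
--         lens = [k + 1 for k in lens + [0] if k < max_overlap and pattern[k] == c]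
--     best_overlap = lens[0] if lens else 0
--
--     delta = candidate_clean[best_overlap:].lstrip(" ,.;:!?-")
--     if not delta:
--         return existing_clean, ""
--
--     return f"{existing_clean} {delta}".strip(), delta
-- ===== Notes on version B (the rewrite author's own statement) =====
-- stated objective: alternative
-- what changed: The descending for-size loop of repeated endswith checks is replaced by a single forward pass over the tail of the existing text that maintains the set of all active candidate-prefix match lengths (a multi-match automaton simulation); the normalization/guard/formatting glue is unchanged.
import Mathlib
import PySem

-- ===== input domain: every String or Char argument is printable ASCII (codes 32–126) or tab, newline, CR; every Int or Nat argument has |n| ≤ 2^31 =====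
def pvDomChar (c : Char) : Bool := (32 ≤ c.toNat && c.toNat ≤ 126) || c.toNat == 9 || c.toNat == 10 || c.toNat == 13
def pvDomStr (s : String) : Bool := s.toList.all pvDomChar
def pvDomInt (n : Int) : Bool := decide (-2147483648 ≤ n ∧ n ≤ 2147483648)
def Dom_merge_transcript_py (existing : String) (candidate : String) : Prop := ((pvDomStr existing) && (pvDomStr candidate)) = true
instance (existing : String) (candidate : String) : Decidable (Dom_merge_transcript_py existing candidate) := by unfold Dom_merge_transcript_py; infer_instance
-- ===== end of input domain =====

-- B replaces A's descending endswith search by a single forward pass over the tail of the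
-- existing text that maintains all active candidate-prefix match lengths (objective: alternative).

-- ===== PORT A =====
-- _normalize_text: " ".join(text.split()).strip()   (shared glue: identical in both Pythons)
def pvNorm (s : List Char) : List Char :=
  PySem.Chars.strip (PySem.Chars.join [' '] (PySem.Chars.split₀ s))

-- .lstrip(" ,.;:!?-"): drop leading characters belonging to the set (exact port of str.lstrip with chars)
def pvLstripDelim (s : List Char) : List Char :=
  s.dropWhile (fun c => (" ,.;:!?-".toList).contains c)

-- shared tail glue (identical in both Pythons): delta = candidate_clean[best:].lstrip(...); guards; f-string
def pvFinish (ec cc : List Char) (best : Nat) : String × String :=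
  let delta := pvLstripDelim (PySem.List.slice cc (some (best : Int)) none)
  if delta = [] then (String.ofList ec, "")
  else (String.ofList (PySem.Chars.strip (ec ++ [' '] ++ delta)), String.ofList delta)

-- A's loop: for size in range(max_overlap, 0, -1): if lower_existing.endswith(lower_candidate[:size]): best = size; break
def pvSearchA (le lc : List Char) : Nat → Nat
  | 0 => 0
  | k + 1 =>
    if PySem.Chars.endswith le (PySem.Chars.slice lc none (some ((k + 1 : Nat) : Int))) then k + 1
    else pvSearchA le lc k

def merge_transcript_py (existing : String) (candidate : String) : String × String :=
  let ec := pvNorm existing.toList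
  let cc := pvNorm candidate.toList
  if cc = [] then (String.ofList ec, "")
  else if ec = [] then (String.ofList cc, String.ofList cc)
  else
    let le := PySem.Chars.lower ec
    let lc := PySem.Chars.lower cc
    let m := min (min le.length lc.length) 280
    pvFinish ec cc (pvSearchA le lc m)

-- ===== PORT B =====
-- one step of B's forward pass: lens = [k + 1 for k in lens + [0] if k < m and pattern[k] == c]
def pvStepB (pat : List Char) (m : Nat) (lens : List Nat) (c : Char) : List Nat :=
  ((lens ++ [0]).filter (fun k => decide (k < m) && (pat.getD k ' ' == c))).map (· + 1)

-- B's search: pattern = lc[:m]; fold the pass over le[-m:]; best = lens[0] if lens else 0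
def pvBestB (le lc : List Char) (m : Nat) : Nat :=
  let pat := PySem.List.slice lc none (some (m : Int))
  let lens := (PySem.List.slice le (some (-(m : Int))) none).foldl (pvStepB pat m) []
  lens.headD 0

def merge_transcript_py_alt (existing : String) (candidate : String) : String × String :=
  let ec := pvNorm existing.toList
  let cc := pvNorm candidate.toList
  if cc = [] then (String.ofList ec, "")
  else if ec = [] then (String.ofList cc, String.ofList cc)
  else
    let le := PySem.Chars.lower ec
    let lc := PySem.Chars.lower cc
    let m := min (min le.length lc.length) 280
    pvFinish ec cc (pvBestB le lc m)

-- ===== PRECONDITION & SPEC =====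
def Spec_merge_transcript_py (existing : String) (candidate : String) (out : String × String) : Prop := out = merge_transcript_py_alt existing candidate
instance (existing : String) (candidate : String) (out : String × String) : Decidable (Spec_merge_transcript_py existing candidate out) := by unfold Spec_merge_transcript_py; infer_instance

-- ===== CLAIM (what is proved, stated in full; the proofs are below) =====
def Claim_equal_merge_transcript_py : Prop := ∀ (existing : String) (candidate : String), Dom_merge_transcript_py existing candidate → Spec_merge_transcript_py existing candidate (merge_transcript_py existing candidate)

-- ===== LEMMAS AND PROOFS =====

-- A's loop is Nat.findGreatest of the endswith test
theorem pvSearchA_eq (le lc : List Char) (m : Nat) :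
    pvSearchA le lc m = Nat.findGreatest (fun j => lc.take j <:+ le) m := by
  induction m with
  | zero => rfl
  | succ k ih =>
    rw [Nat.findGreatest_succ]
    by_cases h : lc.take (k + 1) <:+ le
    · rw [if_pos h]
      simp only [pvSearchA]
      rw [if_pos]
      rw [PySem.Chars.slice_eq_listSlice, PySem.List.slice_to lc (by positivity)]
      simp only [Int.toNat_natCast]
      exact (PySem.Chars.endswith_iff _ _).2 h
    · rw [if_neg h, ← ih]
      simp only [pvSearchA]
      rw [if_neg]
      rw [PySem.Chars.slice_eq_listSlice, PySem.List.slice_to lc (by positivity)]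
      simp only [Int.toNat_natCast, PySem.Chars.endswith_iff]
      exact h

-- le[-m:] is the last m characters
theorem pvSliceNeg (xs : List Char) (m : Nat) (h1 : 1 ≤ m) (hm : m ≤ xs.length) :
    PySem.List.slice xs (some (-(m : Int))) none = xs.drop (xs.length - m) := by
  have h2 : (-(m : Int) < 0) := by omega
  have h3 : ¬ ((xs.length : Int) + -(m : Int) < 0) := by omega
  simp only [PySem.List.slice, PySem.List.clampIdx, if_pos h2, if_neg h3]
  have h4 : ((xs.length : Int) + -(m : Int)).toNat = xs.length - m := by omega
  rw [h4]
  have h5 : xs.length - (xs.length - m) = m := by omega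
  rw [h5]
  exact List.take_of_length_le (by simp [List.length_drop]; omega)

-- a short suffix of le is a suffix of le's tail
theorem pvSuffixDropIff (le s : List Char) (m : Nat) (hm : m ≤ le.length) (hs : s.length ≤ m) :
    s <:+ le ↔ s <:+ le.drop (le.length - m) := by
  constructor
  · intro h
    rw [List.suffix_iff_eq_drop] at h
    rw [h]
    have heq : le.length - s.length = (le.length - m) + (m - s.length) := by omega
    rw [heq, ← List.drop_drop]
    exact List.drop_suffix _ _
  · intro h
    exact h.trans (List.drop_suffix _ _)

-- invariant of B's pass: the fold's state holds exactly the active match lengths, in decreasing order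
theorem pvFoldB (pat : List Char) (m : Nat) (hpm : pat.length = m) (t : List Char) :
    List.Pairwise (· > ·) (t.foldl (pvStepB pat m) []) ∧
      (∀ j, j ∈ t.foldl (pvStepB pat m) [] ↔ 1 ≤ j ∧ j ≤ m ∧ pat.take j <:+ t) := by
  induction t using List.reverseRecOn with
  | nil =>
    refine ⟨List.Pairwise.nil, fun j => ?_⟩
    simp only [List.foldl_nil, List.not_mem_nil, false_iff]
    rintro ⟨h1, hjm, hsuf⟩
    rw [List.suffix_nil, List.take_eq_nil_iff] at hsuf
    rcases hsuf with h | h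
    · omega
    · rw [h] at hpm; simp at hpm; omega
  | append_singleton t c ih =>
    obtain ⟨ihp, ihm⟩ := ih
    rw [List.foldl_concat]
    constructor
    · have hp0 : List.Pairwise (· > ·) ((t.foldl (pvStepB pat m) []) ++ [0]) := by
        rw [List.pairwise_append]
        refine ⟨ihp, List.pairwise_singleton _ _, fun a ha b hb => ?_⟩
        simp only [List.mem_singleton] at hb
        subst hb
        have := (ihm a).1 ha
        omega
      have hpf := hp0.filter (fun k => decide (k < m) && (pat.getD k ' ' == c))
      unfold pvStepB
      rw [List.pairwise_map]
      exact hpf.imp (fun h => by omega)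
    · intro j
      simp only [pvStepB, List.mem_map, List.mem_filter, List.mem_append,
        List.mem_singleton, Bool.and_eq_true, decide_eq_true_eq, beq_iff_eq]
      constructor
      · rintro ⟨k, ⟨hk, hkm, hc⟩, rfl⟩
        have hkp : k < pat.length := by omega
        refine ⟨by omega, by omega, ?_⟩
        have htk : pat.take (k + 1) = pat.take k ++ [pat[k]] := by
          rw [List.take_add_one, List.getElem?_eq_getElem hkp]
          rfl
        have hsuf : pat.take k <:+ t := by
          rcases hk with hk | hk
          · exact ((ihm k).1 hk).2.2
          · subst hk; simp
        obtain ⟨u, hu⟩ := hsuf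
        refine ⟨u, ?_⟩
        rw [htk, ← List.append_assoc, hu]
        rw [List.getD_eq_getElem pat ' ' hkp] at hc
        rw [hc]
      · rintro ⟨h1, hjm, hsuf⟩
        obtain ⟨k, rfl⟩ : ∃ k, j = k + 1 := ⟨j - 1, by omega⟩
        have hkp : k < pat.length := by omega
        rw [List.take_add_one, List.getElem?_eq_getElem hkp] at hsuf
        obtain ⟨u, hu⟩ := hsuf
        rw [show ((some pat[k]).toList : List Char) = [pat[k]] from rfl] at hu
        rw [← List.append_assoc, ← List.concat_eq_append, ← List.concat_eq_append] at hu
        obtain ⟨hu1, hu2⟩ := List.concat_inj.1 hu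
        have hgd : pat.getD k ' ' = c := by
          rw [List.getD_eq_getElem pat ' ' hkp]; exact hu2
        refine ⟨k, ⟨?_, by omega, hgd⟩, rfl⟩
        by_cases hk0 : k = 0
        · right; exact hk0
        · left
          exact (ihm k).2 ⟨by omega, by omega, ⟨u, hu1⟩⟩

-- head of such a state is Nat.findGreatest
theorem pvHeadD_eq (lens : List Nat) (m : Nat) (Q : Nat → Prop) [DecidablePred Q]
    (hs : List.Pairwise (· > ·) lens) (hm : ∀ j, j ∈ lens ↔ 1 ≤ j ∧ j ≤ m ∧ Q j) :
    lens.headD 0 = Nat.findGreatest Q m := by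
  cases lens with
  | nil =>
    simp only [List.headD_nil]
    symm
    rw [Nat.findGreatest_eq_zero_iff]
    intro j hj hjm hq
    exact (List.not_mem_nil).elim (((hm j).2 ⟨hj, hjm, hq⟩))
  | cons h t =>
    obtain ⟨h1, hm', hq⟩ := (hm h).1 List.mem_cons_self
    have hle : h ≤ Nat.findGreatest Q m := Nat.le_findGreatest hm' hq
    have hQg : Q (Nat.findGreatest Q m) := Nat.findGreatest_spec hm' hq
    have hgmem : Nat.findGreatest Q m ∈ h :: t :=
      (hm _).2 ⟨by omega, Nat.findGreatest_le m, hQg⟩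
    have hge : Nat.findGreatest Q m ≤ h := by
      rcases List.mem_cons.1 hgmem with h' | h'
      · omega
      · exact le_of_lt ((List.pairwise_cons.1 hs).1 _ h')
    simp only [List.headD_cons]
    omega

theorem pvFindGreatest_congr (P Q : Nat → Prop) [DecidablePred P] [DecidablePred Q] (m : Nat)
    (h : ∀ j, 1 ≤ j → j ≤ m → (P j ↔ Q j)) :
    Nat.findGreatest P m = Nat.findGreatest Q m := by
  induction m with
  | zero => rfl
  | succ k ih =>
    rw [Nat.findGreatest_succ, Nat.findGreatest_succ]
    by_cases hp : P (k + 1)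
    · rw [if_pos hp, if_pos ((h (k + 1) (by omega) (by omega)).1 hp)]
    · rw [if_neg hp, if_neg (fun hq => hp ((h (k + 1) (by omega) (by omega)).2 hq))]
      exact ih (fun j hj1 hj2 => h j hj1 (by omega))

-- the two searches agree
theorem pvBest_eq (le lc : List Char) (m : Nat) (h1 : 1 ≤ m) (hle : m ≤ le.length) (hlc : m ≤ lc.length) :
    pvSearchA le lc m = pvBestB le lc m := by
  unfold pvBestB
  have hpat : PySem.List.slice lc none (some (m : Int)) = lc.take m := by
    rw [PySem.List.slice_to lc (by positivity)]
    simp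
  have hpm : (lc.take m).length = m := by
    simp only [List.length_take]
    omega
  rw [hpat, pvSliceNeg le m h1 hle]
  obtain ⟨hs, hm'⟩ := pvFoldB (lc.take m) m hpm (le.drop (le.length - m))
  rw [pvSearchA_eq, pvHeadD_eq _ m _ hs hm']
  apply pvFindGreatest_congr
  intro j hj1 hjm
  rw [List.take_take, min_eq_left hjm]
  exact pvSuffixDropIff le (lc.take j) m hle (by simp only [List.length_take]; omega)

-- ===== VERDICT (by name: the statement is the Claim_ definition above) =====
theorem merge_transcript_py_spec : Claim_equal_merge_transcript_py := by
  intro existing candidate _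
  unfold Spec_merge_transcript_py
  by_cases hcc : pvNorm candidate.toList = []
  · simp [merge_transcript_py, merge_transcript_py_alt, hcc]
  by_cases hec : pvNorm existing.toList = []
  · simp [merge_transcript_py, merge_transcript_py_alt, hcc, hec]
  · have hle : 1 ≤ (PySem.Chars.lower (pvNorm existing.toList)).length := by
      simp only [PySem.Chars.lower, List.length_map]
      cases h : pvNorm existing.toList with
      | nil => exact absurd h hec
      | cons a t => simp
    have hlc : 1 ≤ (PySem.Chars.lower (pvNorm candidate.toList)).length := by
      simp only [PySem.Chars.lower, List.length_map]
      cases h : pvNorm candidate.toList with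
      | nil => exact absurd h hcc
      | cons a t => simp
    simp only [merge_transcript_py, merge_transcript_py_alt, hcc, hec, if_false]
    rw [pvBest_eq _ _ _ (by omega) (by omega) (by omega)]
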